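-- pv_equiv track=rewrite | github.com/RahulGopinath31/coding_interview_prep | featured_item.py | featured_product
-- ===== SOURCE A (Python) =====
-- def featured_product(items):
--     ## create a dictionary with items and its corresponding occurance in the list
--     item_num_dict = dict()
--     max = 0
--
--     for item in items: # T(n) = O(n)
--         if item in item_num_dict:
--             item_num_dict[item] += 1
--
--         else:
--             item_num_dict[item] = 1
--
--         if item_num_dict[item] > max:
--             max = item_num_dict[item]
--
--
--
--     item_name = ''
--     for key in item_num_dict.keys():
--         if item_num_dict[key] == max and item_name < key:
--             item_name = key
--
--
--     return item_name
-- ===== SOURCE B (Python) =====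
-- def featured_product(items):
--     best = ''
--     best_count = 0
--     run = 0
--     prev = None
--     for x in sorted(items):
--         if x == prev:
--             run += 1
--         else:
--             run = 1
--             prev = x
--         if run >= best_count:
--             best = x
--             best_count = run
--     return best
-- ===== Notes on version B (the rewrite author's own statement) =====
-- stated objective: alternative
-- what changed: Replaced the dict-counting pass plus max-then-rescan over keys by sort-then-scan: sort the list and walk it once maintaining the current run length, taking the last run whose length reaches the best count (ascending order makes that the lexicographically largest among the most frequent).
import Mathlib
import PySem

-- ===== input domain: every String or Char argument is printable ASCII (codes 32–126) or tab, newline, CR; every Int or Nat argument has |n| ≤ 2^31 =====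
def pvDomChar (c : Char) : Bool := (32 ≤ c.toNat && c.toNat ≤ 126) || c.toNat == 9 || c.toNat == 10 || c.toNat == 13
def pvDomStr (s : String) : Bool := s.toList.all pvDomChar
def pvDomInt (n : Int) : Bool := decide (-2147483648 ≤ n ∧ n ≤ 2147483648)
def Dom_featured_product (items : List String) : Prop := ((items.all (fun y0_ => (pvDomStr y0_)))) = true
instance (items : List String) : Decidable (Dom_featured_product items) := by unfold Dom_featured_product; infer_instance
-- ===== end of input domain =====

-- B replaces A's dict-count-then-rescan by a single scan over the sorted list; equivalence of the two strategies is proved below.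

-- ===== PORT A =====
def featured_product (items : List String) : String :=
  let st := items.foldl
    (fun (p : PySem.Dict String Int × Int) item =>
      let d := if p.1.contains item
               then p.1.insert item (p.1.getD item 0 + 1)
               else p.1.insert item 1
      let c := d.getD item 0
      (d, if c > p.2 then c else p.2))
    (PySem.Dict.empty, 0)
  st.1.keys.foldl
    (fun name key => if st.1.getD key 0 = st.2 ∧ name < key then key else name) ""

-- ===== PORT B =====
def featured_product_alt (items : List String) : String :=
  let st := (PySem.List.sorted items (fun x => x) false).foldl
    (fun (s : String × Int × Int × Option String) x =>
      let rp : Int × Option String :=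
        if s.2.2.2 = some x then (s.2.2.1 + 1, s.2.2.2) else ((1 : Int), some x)
      if rp.1 ≥ s.2.1 then (x, rp.1, rp) else (s.1, s.2.1, rp))
    ("", 0, 0, none)
  st.1

-- ===== PRECONDITION & SPEC =====
def Spec_featured_product (items : List String) (out : String) : Prop := out = featured_product_alt items
instance (items : List String) (out : String) : Decidable (Spec_featured_product items out) := by unfold Spec_featured_product; infer_instance

-- ===== CLAIM (what is proved, stated in full; the proofs are below) =====
def Claim_equal_featured_product : Prop := ∀ (items : List String), Dom_featured_product items → Spec_featured_product items (featured_product items)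

-- ===== LEMMAS AND PROOFS =====

-- the empty string is the least string
theorem str_nil_le (s : String) : "" ≤ s := by
  by_contra h
  rw [not_le, String.lt_iff_toList_lt] at h
  simp at h

-- m is the maximal multiplicity occurring in l (0 if l is empty)
def MaxMult (l : List String) (m : Int) : Prop :=
  0 ≤ m ∧ (∀ k ∈ l, (List.count k l : Int) ≤ m) ∧ (m = 0 ∨ ∃ k ∈ l, (List.count k l : Int) = m)

-- r is the lexicographically largest element of l with multiplicity m ("" if there is none)
def BestPick (l : List String) (m : Int) (r : String) : Prop :=
  (r = "" ∨ (r ∈ l ∧ (List.count r l : Int) = m)) ∧ (∀ k ∈ l, (List.count k l : Int) = m → k ≤ r)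

theorem isMax_unique {l : List String} {m m' : Int} (h : MaxMult l m) (h' : MaxMult l m') : m = m' := by
  obtain ⟨h0, hub, hat⟩ := h
  obtain ⟨h0', hub', hat'⟩ := h'
  apply le_antisymm
  · rcases hat with h | ⟨k, hk, hc⟩
    · omega
    · exact hc ▸ hub' k hk
  · rcases hat' with h | ⟨k, hk, hc⟩
    · omega
    · exact hc ▸ hub k hk

theorem isBest_unique {l : List String} {m : Int} {r r' : String}
    (h : BestPick l m r) (h' : BestPick l m r') : r = r' := by
  obtain ⟨hm, hub⟩ := h
  obtain ⟨hm', hub'⟩ := h'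
  apply le_antisymm
  · rcases hm with rfl | ⟨hmem, hc⟩
    · exact str_nil_le r'
    · exact hub' r hmem hc
  · rcases hm' with rfl | ⟨hmem, hc⟩
    · exact str_nil_le r
    · exact hub r' hmem hc

-- ---------- A side ----------

-- the running maximum A's first loop maintains, in accumulator form
def mu : List String → List String → Int → Int
  | _, [], m => m
  | q, x :: r, m => mu (q ++ [x]) r (max m ((List.count x q : Int) + 1))

theorem mu_ge : ∀ (r q : List String) (m : Int), m ≤ mu q r m := by
  intro r
  induction r with
  | nil => intro q m; exact le_refl m
  | cons x r ih =>
    intro q m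
    exact le_trans (le_max_left _ _) (ih (q ++ [x]) _)

theorem mu_upper : ∀ (r q : List String) (m : Int) (k : String), k ∈ r →
    (List.count k (q ++ r) : Int) ≤ mu q r m := by
  intro r
  induction r with
  | nil => intro _ _ _ hk; cases hk
  | cons x r ih =>
    intro q m k hk
    by_cases hkr : k ∈ r
    · have := ih (q ++ [x]) (max m ((List.count x q : Int) + 1)) k hkr
      simpa [mu, List.append_assoc] using this
    · have hkx : k = x := (List.mem_cons.mp hk).resolve_right hkr
      subst hkx
      have hc : List.count k (q ++ k :: r) = List.count k q + 1 := by
        have hr : List.count k r = 0 := List.count_eq_zero.mpr hkr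
        simp [List.count_append, hr]
      have hge : max m ((List.count k q : Int) + 1) ≤ mu (q ++ [k]) r (max m ((List.count k q : Int) + 1)) :=
        mu_ge r _ _
      have : (List.count k q : Int) + 1 ≤ mu (q ++ [k]) r (max m ((List.count k q : Int) + 1)) :=
        le_trans (le_max_right _ _) hge
      simp only [mu]
      rw [hc]
      push_cast
      omega

theorem mu_attained : ∀ (r q : List String) (m : Int),
    mu q r m = m ∨ ∃ k ∈ r, (List.count k (q ++ r) : Int) = mu q r m := by
  intro r
  induction r with
  | nil => intro q m; exact Or.inl rfl
  | cons x r ih =>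
    intro q m
    rcases ih (q ++ [x]) (max m ((List.count x q : Int) + 1)) with h | ⟨k, hk, hc⟩
    · by_cases hm : (List.count x q : Int) + 1 ≤ m
      · left
        simp only [mu, h]
        omega
      · right
        refine ⟨x, List.mem_cons_self, ?_⟩
        have hub := mu_upper (x :: r) q m x List.mem_cons_self
        have hmu : mu q (x :: r) m = (List.count x q : Int) + 1 := by
          simp only [mu, h]; omega
        have hcnt : List.count x (q ++ x :: r) = List.count x q + 1 + List.count x r := by
          simp [List.count_append]
          omega
        rw [hmu]
        rw [hcnt] at hub ⊢
        rw [hmu] at hub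
        push_cast at hub ⊢
        omega
    · right
      refine ⟨k, List.mem_cons_of_mem x hk, ?_⟩
      simpa [mu, List.append_assoc] using hc

theorem isMax_mu (items : List String) : MaxMult items (mu [] items 0) := by
  refine ⟨mu_ge items [] 0, ?_, ?_⟩
  · intro k hk
    simpa using mu_upper items [] 0 k hk
  · rcases mu_attained items [] 0 with h | ⟨k, hk, hc⟩
    · exact Or.inl h
    · exact Or.inr ⟨k, hk, by simpa using hc⟩

-- A's first loop computes (counter, running max)
theorem loopA : ∀ (r q : List String) (m : Int),
    r.foldl
      (fun (p : PySem.Dict String Int × Int) item =>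
        let d := if p.1.contains item
                 then p.1.insert item (p.1.getD item 0 + 1)
                 else p.1.insert item 1
        let c := d.getD item 0
        (d, if c > p.2 then c else p.2))
      (PySem.Dict.counter q, m)
    = (PySem.Dict.counter (q ++ r), mu q r m) := by
  intro r
  induction r with
  | nil => intro q m; simp [mu]
  | cons x r ih =>
    intro q m
    have hstepA :
        (if (PySem.Dict.counter q).contains x
         then (PySem.Dict.counter q).insert x ((PySem.Dict.counter q).getD x 0 + 1)
         else (PySem.Dict.counter q).insert x 1)
        = PySem.Dict.counter (q ++ [x]) := by
      rw [PySem.Dict.counter_append_singleton]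
      by_cases hc : (PySem.Dict.counter q).contains x = true
      · simp [hc, PySem.Dict.modify, PySem.Dict.getD_counter]
      · have hc' : (PySem.Dict.counter q).contains x = false := by
          simpa using hc
        rw [if_neg (by simp [hc'])]
        rw [PySem.Dict.modify, PySem.Dict.getD_of_not_contains _ _ hc']
        norm_num
    have hgd : (PySem.Dict.counter (q ++ [x])).getD x 0 = (List.count x q : Int) + 1 := by
      rw [PySem.Dict.getD_counter]
      simp [List.count_append]
    have hmax : (if ((List.count x q : Int) + 1) > m then ((List.count x q : Int) + 1) else m)
        = max m ((List.count x q : Int) + 1) := by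
      rcases le_or_gt ((List.count x q : Int) + 1) m with h | h
      · simp [not_lt.mpr h, max_eq_left h]
      · simp [h, max_eq_right (le_of_lt h)]
    simp only [List.foldl_cons, hstepA, hgd, hmax]
    have := ih (q ++ [x]) (max m ((List.count x q : Int) + 1))
    simpa [mu, List.append_assoc] using this

-- A's second loop is a selection fold
theorem selA (f : String → Int) (m : Int) :
    ∀ (L : List String) (name : String),
      (L.foldl (fun n k => if f k = m ∧ n < k then k else n) name = name
        ∨ (L.foldl (fun n k => if f k = m ∧ n < k then k else n) name ∈ L
            ∧ f (L.foldl (fun n k => if f k = m ∧ n < k then k else n) name) = m))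
      ∧ (∀ k ∈ L, f k = m → k ≤ L.foldl (fun n k => if f k = m ∧ n < k then k else n) name)
      ∧ name ≤ L.foldl (fun n k => if f k = m ∧ n < k then k else n) name := by
  intro L
  induction L with
  | nil => intro name; exact ⟨Or.inl rfl, by simp, le_refl name⟩
  | cons x L ih =>
    intro name
    set name' := if f x = m ∧ name < x then x else name with hname'
    have hstep : (x :: L).foldl (fun n k => if f k = m ∧ n < k then k else n) name
        = L.foldl (fun n k => if f k = m ∧ n < k then k else n) name' := by
      simp [hname']
    obtain ⟨ih1, ih2, ih3⟩ := ih name'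
    have hnn' : name ≤ name' := by
      rw [hname']; split
      · exact le_of_lt (by tauto)
      · exact le_refl name
    rw [hstep]
    refine ⟨?_, ?_, le_trans hnn' ih3⟩
    · rcases ih1 with h | ⟨hmem, hf⟩
      · rw [h, hname']
        split
        · rename_i hcond
          exact Or.inr ⟨List.mem_cons_self, hcond.1⟩
        · exact Or.inl rfl
      · exact Or.inr ⟨List.mem_cons_of_mem x hmem, hf⟩
    · intro k hk hfk
      rcases List.mem_cons.mp hk with rfl | hk'
      · by_cases hlt : name < k
        · have : name' = k := by rw [hname']; simp [hfk, hlt]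
          exact this ▸ ih3
        · exact le_trans (le_trans (not_lt.mp hlt) hnn') ih3
      · exact ih2 k hk' hfk

theorem a_isBest (items : List String) :
    MaxMult items (mu [] items 0) ∧ BestPick items (mu [] items 0) (featured_product items) := by
  refine ⟨isMax_mu items, ?_⟩
  have hloop := loopA items [] 0
  simp only [List.nil_append] at hloop
  have hA : featured_product items
      = (PySem.Set.ofList items).foldl
          (fun n k => if (List.count k items : Int) = mu [] items 0 ∧ n < k then k else n) "" := by
    unfold featured_product
    have hce : PySem.Dict.empty = PySem.Dict.counter ([] : List String) := rfl
    rw [hce, hloop]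
    show (PySem.Dict.counter items).keys.foldl
      (fun name key => if (PySem.Dict.counter items).getD key 0 = mu [] items 0 ∧ name < key
        then key else name) "" = _
    rw [PySem.Dict.keys_counter]
    apply PySem.List.foldl_congr_mem
    intro acc k _
    rw [PySem.Dict.getD_counter]
  rw [hA]
  obtain ⟨h1, h2, _⟩ := selA (fun k => (List.count k items : Int)) (mu [] items 0)
    (PySem.Set.ofList items) ""
  constructor
  · rcases h1 with h | ⟨hmem, hf⟩
    · exact Or.inl h
    · exact Or.inr ⟨(PySem.Set.mem_ofList items _).mp hmem, hf⟩
  · intro k hk hc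
    exact h2 k ((PySem.Set.mem_ofList items k).mpr hk) hc

-- ---------- B side ----------

-- the loop invariant of B's single scan over the sorted list
def InvB (q : List String) (st : String × Int × Int × Option String) : Prop :=
  MaxMult q st.2.1 ∧ BestPick q st.2.1 st.1 ∧
  ((q = [] ∧ st.2.2.2 = none) ∨
   (∃ p, st.2.2.2 = some p ∧ p ∈ q ∧ (∀ y ∈ q, y ≤ p) ∧ st.2.2.1 = (List.count p q : Int)))

theorem invB_step (q : List String) (x : String) (st : String × Int × Int × Option String)
    (hle : ∀ y ∈ q, y ≤ x) (hinv : InvB q st) :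
    InvB (q ++ [x])
      ((fun (s : String × Int × Int × Option String) x =>
        let rp : Int × Option String :=
          if s.2.2.2 = some x then (s.2.2.1 + 1, s.2.2.2) else ((1 : Int), some x)
        if rp.1 ≥ s.2.1 then (x, rp.1, rp) else (s.1, s.2.1, rp)) st x) := by
  obtain ⟨b, bc, run, prev⟩ := st
  obtain ⟨⟨hbc0, hbcub, hbcat⟩, ⟨hbm, hbub⟩, hprev⟩ := hinv
  dsimp only at hbc0 hbcub hbcat hbm hbub hprev ⊢
  -- the new run value is the multiplicity of x in q ++ [x]
  have hrp : (if prev = some x then (run + 1, prev) else ((1 : Int), some x))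
      = ((List.count x q : Int) + 1, some x) := by
    rcases hprev with ⟨hq, hpn⟩ | ⟨p, hp, hpq, hpub, hrun⟩
    · subst hq
      simp [hpn]
    · by_cases hpx : prev = some x
      · have hpx' : p = x := by rw [hp] at hpx; exact Option.some.inj hpx
        subst hpx'
        simp [hpx, hrun]
      · have hxq : x ∉ q := by
          intro hxq
          have h1 : x ≤ p := hpub x hxq
          have h2 : p ≤ x := hle p hpq
          have : p = x := le_antisymm h2 h1
          exact hpx (by rw [hp, this])
        simp [hpx, List.count_eq_zero.mpr hxq]
  have hcx : (List.count x (q ++ [x]) : Int) = (List.count x q : Int) + 1 := by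
    simp [List.count_append]
  have hcy : ∀ y, y ≠ x → List.count y (q ++ [x]) = List.count y q := by
    intro y hy
    have h0 : List.count y [x] = 0 := List.count_eq_zero.mpr (by simp [hy])
    simp [List.count_append, h0]
  have hc0 : (0 : Int) ≤ (List.count x q : Int) := by positivity
  rw [hrp]
  by_cases hge : (List.count x q : Int) + 1 ≥ bc
  · rw [if_pos hge]
    unfold InvB MaxMult BestPick
    dsimp only
    refine ⟨⟨by omega, ?_, Or.inr ⟨x, by simp, hcx⟩⟩, ⟨Or.inr ⟨by simp, hcx⟩, ?_⟩,
      Or.inr ⟨x, rfl, by simp, ?_, hcx.symm⟩⟩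
    · intro k hk
      by_cases hkx : k = x
      · subst hkx; rw [hcx]
      · rw [hcy k hkx]
        have hk' : k ∈ q := by
          rcases List.mem_append.mp hk with h | h
          · exact h
          · simp at h; exact absurd h hkx
        exact le_trans (hbcub k hk') hge
    · intro k hk _
      rcases List.mem_append.mp hk with h | h
      · exact hle k h
      · simp at h; exact le_of_eq h
    · intro y hy
      rcases List.mem_append.mp hy with h | h
      · exact hle y h
      · simp at h; exact le_of_eq h
  · rw [if_neg hge]
    rw [not_le] at hge
    unfold InvB MaxMult BestPick
    dsimp only
    have hxbc : (List.count x q : Int) ≠ bc := by omega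
    refine ⟨⟨hbc0, ?_, ?_⟩, ⟨?_, ?_⟩,
      Or.inr ⟨x, rfl, by simp, ?_, hcx.symm⟩⟩
    · intro k hk
      by_cases hkx : k = x
      · subst hkx; rw [hcx]; omega
      · rw [hcy k hkx]
        have hk' : k ∈ q := by
          rcases List.mem_append.mp hk with h | h
          · exact h
          · simp at h; exact absurd h hkx
        exact hbcub k hk'
    · rcases hbcat with h | ⟨k, hk, hck⟩
      · exact Or.inl h
      · have hkx : k ≠ x := by
          intro h; subst h; rw [hck] at hxbc; exact hxbc rfl
        exact Or.inr ⟨k, List.mem_append.mpr (Or.inl hk), by rw [hcy k hkx]; exact hck⟩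
    · rcases hbm with h | ⟨hmem, hcb⟩
      · exact Or.inl h
      · have hbx : b ≠ x := by
          intro h; subst h; rw [hcb] at hxbc; exact hxbc rfl
        exact Or.inr ⟨List.mem_append.mpr (Or.inl hmem), by rw [hcy b hbx]; exact hcb⟩
    · intro k hk hck
      by_cases hkx : k = x
      · subst hkx; rw [hcx] at hck; omega
      · have hk' : k ∈ q := by
          rcases List.mem_append.mp hk with h | h
          · exact h
          · simp at h; exact absurd h hkx
        rw [hcy k hkx] at hck
        exact hbub k hk' hck
    · intro y hy
      rcases List.mem_append.mp hy with h | h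
      · exact hle y h
      · simp at h; exact le_of_eq h

theorem invB_fold : ∀ (r q : List String) (st : String × Int × Int × Option String),
    (∀ y ∈ q, ∀ z ∈ r, y ≤ z) → List.Pairwise (· ≤ ·) r → InvB q st →
    InvB (q ++ r)
      (r.foldl
        (fun (s : String × Int × Int × Option String) x =>
          let rp : Int × Option String :=
            if s.2.2.2 = some x then (s.2.2.1 + 1, s.2.2.2) else ((1 : Int), some x)
          if rp.1 ≥ s.2.1 then (x, rp.1, rp) else (s.1, s.2.1, rp)) st) := by
  intro r
  induction r with
  | nil => intro q st _ _ h; simpa using h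
  | cons x r ih =>
    intro q st hqr hpw hinv
    have hpw' := (List.pairwise_cons.mp hpw)
    have hstep := invB_step q x st (fun y hy => hqr y hy x List.mem_cons_self) hinv
    have := ih (q ++ [x]) _
      (by
        intro y hy z hz
        rcases List.mem_append.mp hy with h | h
        · exact hqr y h z (List.mem_cons_of_mem x hz)
        · simp at h; subst h; exact hpw'.1 z hz)
      hpw'.2 hstep
    simpa [List.append_assoc] using this

theorem b_isBest (items : List String) :
    ∃ m : Int, MaxMult items m ∧ BestPick items m (featured_product_alt items) := by
  set s := PySem.List.sorted items (fun x => x) false with hs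
  have hperm : s.Perm items := PySem.List.sorted_perm items (fun x => x) false
  have hpw : List.Pairwise (· ≤ ·) s := PySem.List.sorted_pairwise items (fun x => x)
  have h0 : InvB [] (("", 0, 0, none) : String × Int × Int × Option String) := by
    refine ⟨⟨le_refl 0, by simp, Or.inl rfl⟩, ⟨Or.inl rfl, by simp⟩, Or.inl ⟨rfl, rfl⟩⟩
  have hinv := invB_fold s [] ("", 0, 0, none) (by simp) hpw h0
  simp only [List.nil_append] at hinv
  set stf := s.foldl
    (fun (s : String × Int × Int × Option String) x =>
      let rp : Int × Option String :=
        if s.2.2.2 = some x then (s.2.2.1 + 1, s.2.2.2) else ((1 : Int), some x)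
      if rp.1 ≥ s.2.1 then (x, rp.1, rp) else (s.1, s.2.1, rp)) ("", 0, 0, none) with hstf
  have hres : featured_product_alt items = stf.1 := by
    unfold featured_product_alt
    rw [← hs, ← hstf]
  obtain ⟨⟨h1, h2, h3⟩, ⟨h4, h5⟩, _⟩ := hinv
  refine ⟨stf.2.1, ⟨h1, ?_, ?_⟩, ?_, ?_⟩
  · intro k hk
    rw [← hperm.count_eq k]
    exact h2 k (hperm.mem_iff.mpr hk)
  · rcases h3 with h | ⟨k, hk, hck⟩
    · exact Or.inl h
    · exact Or.inr ⟨k, hperm.mem_iff.mp hk, by rw [← hperm.count_eq k]; exact hck⟩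
  · rw [hres]
    rcases h4 with h | ⟨hmem, hc⟩
    · exact Or.inl h
    · exact Or.inr ⟨hperm.mem_iff.mp hmem, by rw [← hperm.count_eq _]; exact hc⟩
  · intro k hk hck
    rw [hres]
    exact h5 k (hperm.mem_iff.mpr hk) (by rw [hperm.count_eq k]; exact hck)

-- ===== VERDICT (by name: the statement is the Claim_ definition above) =====
theorem featured_product_spec : Claim_equal_featured_product := by
  intro items _
  unfold Spec_featured_product
  obtain ⟨hAmax, hAbest⟩ := a_isBest items
  obtain ⟨m, hBmax, hBbest⟩ := b_isBest items
  have hm : mu [] items 0 = m := isMax_unique hAmax hBmax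
  rw [hm] at hAbest
  exact isBest_unique hAbest hBbest
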